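-- pv_equiv track=rewrite | github.com/oirlab/tmt-crds | crds/jwst/tpn.py | _fix_quoted_whitespace
-- ===== SOURCE A (Python) =====
-- def _fix_quoted_whitespace(line):
--     """Replace spaces and tabs which appear inside quotes in `line` with
--     underscores,  and return it.
--     """
--     i = 0
--     while i < len(line):
--         char = line[i]
--         i += 1
--         if char != '"':
--             continue
--         quote = char
--         while i < len(line):
--             char = line[i]
--             i += 1
--             if char == quote:
--                 break
--             if char in " \t":
--                 line = line[:i-1] + "_" + line[i:]
--     return line
-- ===== SOURCE B (Python) =====
-- def _fix_quoted_whitespace(line):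
--     parts = line.split('"')
--     for k in range(1, len(parts), 2):
--         parts[k] = parts[k].replace(" ", "_").replace("\t", "_")
--     return '"'.join(parts)
-- ===== Notes on version B (the rewrite author's own statement) =====
-- stated objective: faster
-- what changed: Replaced the index-driven nested while-loops that rebuild the string by slicing for every quoted space or tab with a split-on-the-quote-character pass: split the line at quotes, replace whitespace in the odd (in-quote) segments, and join the segments back with quotes.
import Mathlib
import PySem

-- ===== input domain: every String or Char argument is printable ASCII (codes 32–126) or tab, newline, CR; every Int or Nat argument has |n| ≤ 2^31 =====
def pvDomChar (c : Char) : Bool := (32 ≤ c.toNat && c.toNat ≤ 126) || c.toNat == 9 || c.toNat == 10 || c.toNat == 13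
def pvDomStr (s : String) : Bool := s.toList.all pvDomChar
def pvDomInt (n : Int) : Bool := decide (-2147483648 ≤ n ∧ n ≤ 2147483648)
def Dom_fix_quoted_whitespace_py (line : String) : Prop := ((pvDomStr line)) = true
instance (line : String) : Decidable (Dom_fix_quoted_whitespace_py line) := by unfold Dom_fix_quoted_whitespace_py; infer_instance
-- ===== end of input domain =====

-- B replaces A's quadratic nested while-loops (a fresh string is built by slicing for every
-- quoted space/tab) with a linear split-at-quotes / replace-in-odd-segments / join pass;
-- objective: faster (measured faster in a timing run).


-- ===== PORT A =====
-- A's inner `while i < len(line)` loop: reads char = line[i], i += 1; breaks on the closing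
-- quote; on a space/tab splices  line[:i-1] + "_" + line[i:]  (these slices with nonnegative
-- in-range indices are exactly List.take (i-1) / List.drop i over the character list).
-- `fuel` only bounds iterations to make the recursion structural: each iteration advances i by 1
-- and the splice preserves the length, so fuel = line.length - i is never exhausted.
def fixInnerA : Nat → List Char → Nat → List Char × Nat
  | 0, line, i => (line, i)
  | fuel + 1, line, i =>
    if i < line.length then
      let char := line.getD i ' '
      let i := i + 1
      if char == '"' then (line, i)
      else
        let line := if char == ' ' || char == '\t'
                    then line.take (i - 1) ++ ['_'] ++ line.drop i
                    else line
        fixInnerA fuel line i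
    else (line, i)

-- A's outer `while i < len(line)` loop: skips non-quote chars; on a '"' runs the inner loop
-- (which returns the updated line and index) and continues from there.
def fixOuterA : Nat → List Char → Nat → List Char
  | 0, line, _ => line
  | fuel + 1, line, i =>
    if i < line.length then
      let char := line.getD i ' '
      let i := i + 1
      if char != '"' then fixOuterA fuel line i
      else
        let p := fixInnerA line.length line i
        fixOuterA fuel p.1 p.2
    else line

def fix_quoted_whitespace_py (line : String) : String :=
  String.mk (fixOuterA line.toList.length line.toList 0)

-- ===== PORT B =====
-- port of the split at the quote character (library call, ported as the obvious structural split)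
def splitQ : List Char → List (List Char)
  | [] => [[]]
  | c :: rest =>
    if c = '"' then [] :: splitQ rest
    else match splitQ rest with
      | [] => [[c]]          -- unreachable: splitQ never returns []
      | s :: ss => (c :: s) :: ss

-- port of seg.replace(" ", "_") and .replace("\t", "_") (single-char replace = map)
def replSpace (seg : List Char) : List Char := seg.map (fun c => if c = ' ' then '_' else c)
def replTab (seg : List Char) : List Char := seg.map (fun c => if c = '\t' then '_' else c)

-- port of `for k in range(1, len(parts), 2): parts[k] = …` — the odd-index segments are
-- exactly the ones reached with `inside = true` when alternating a flag along the list
def fixParts : List (List Char) → Bool → List (List Char)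
  | [], _ => []
  | p :: ps, inside => (if inside then replTab (replSpace p) else p) :: fixParts ps (!inside)

-- port of joining the parts back with the quote character
def joinQ : List (List Char) → List Char
  | [] => []
  | [p] => p
  | p :: ps => p ++ '"' :: joinQ ps

def fix_quoted_whitespace_py_alt (line : String) : String :=
  String.mk (joinQ (fixParts (splitQ line.toList) false))

-- ===== PRECONDITION & SPEC =====
def Spec_fix_quoted_whitespace_py (line : String) (out : String) : Prop := out = fix_quoted_whitespace_py_alt line
instance (line : String) (out : String) : Decidable (Spec_fix_quoted_whitespace_py line out) := by unfold Spec_fix_quoted_whitespace_py; infer_instance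

-- ===== CLAIM (what is proved, stated in full; the proofs are below) =====
def Claim_equal_fix_quoted_whitespace_py : Prop := ∀ (line : String), Dom_fix_quoted_whitespace_py line → Spec_fix_quoted_whitespace_py line (fix_quoted_whitespace_py line)

-- ===== LEMMAS AND PROOFS =====

-- proof-only bridge: a single scan with an in-quote flag; both ports are related to it
def fixScanB : List Char → Bool → List Char
  | [], _ => []
  | c :: rest, inq =>
    if c == '"' then c :: fixScanB rest (!inq)
    else if inq && (c == ' ' || c == '\t') then '_' :: fixScanB rest inq
    else c :: fixScanB rest inq

theorem splitQ_ne_nil (l : List Char) : splitQ l ≠ [] := by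
  cases l with
  | nil => simp [splitQ]
  | cons c rest =>
    by_cases hq : c = '"'
    · simp [splitQ, hq]
    · simp only [splitQ, if_neg hq]
      cases splitQ rest <;> simp

theorem joinQ_cons_head (a : Char) (y : List Char) (xs : List (List Char)) :
    joinQ ((a :: y) :: xs) = a :: joinQ (y :: xs) := by
  cases xs <;> simp [joinQ]

-- the scanner computes exactly B's split/replace/join
theorem scan_eq_parts : ∀ (l : List Char) (b : Bool),
    fixScanB l b = joinQ (fixParts (splitQ l) b) := by
  intro l
  induction l with
  | nil => intro b; simp [fixScanB, splitQ, fixParts, replSpace, replTab, joinQ]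
  | cons c rest ih =>
    intro b
    by_cases hq : c = '"'
    · have hne := splitQ_ne_nil rest
      simp only [fixScanB, splitQ, hq, if_pos, beq_self_eq_true]
      rw [ih (!b)]
      cases hps : fixParts (splitQ rest) (!b) with
      | nil => cases hsq : splitQ rest with
        | nil => exact absurd hsq hne
        | cons s ss => rw [hsq] at hps; simp [fixParts] at hps
      | cons p ps => simp only [fixParts]; rw [hps]; simp [replSpace, replTab, joinQ]
    · obtain ⟨s, ss, hsq⟩ : ∃ s ss, splitQ rest = s :: ss := by
        cases hsq : splitQ rest with
        | nil => exact absurd hsq (splitQ_ne_nil rest)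
        | cons s ss => exact ⟨s, ss, rfl⟩
      have hstep : splitQ (c :: rest) = (c :: s) :: ss := by
        simp [splitQ, hq, hsq]
      by_cases hb : b = true
      · by_cases hsp : c = ' ' ∨ c = '\t'
        · have : fixScanB (c :: rest) b = '_' :: fixScanB rest b := by
            rcases hsp with hsp | hsp <;> simp [fixScanB, hsp, hb]
          rw [this, ih b, hstep, hsq]
          simp only [fixParts, hb, if_pos]
          have hrepl : replTab (replSpace (c :: s)) = '_' :: replTab (replSpace s) := by
            rcases hsp with hsp | hsp <;> simp [replSpace, replTab, hsp]
          rw [hrepl, joinQ_cons_head]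
        · rw [not_or] at hsp
          have : fixScanB (c :: rest) b = c :: fixScanB rest b := by
            simp [fixScanB, hsp.1, hsp.2, hq]
          rw [this, ih b, hstep, hsq]
          simp only [fixParts, hb, if_pos]
          have hrepl : replTab (replSpace (c :: s)) = c :: replTab (replSpace s) := by
            simp [replSpace, replTab, hsp.1, hsp.2]
          rw [hrepl, joinQ_cons_head]
      · have hb' : b = false := by cases b <;> simp_all
        have : fixScanB (c :: rest) b = c :: fixScanB rest b := by
          simp [fixScanB, hq, hb']
        rw [this, ih b, hstep, hsq]
        simp only [fixParts, hb', if_neg, Bool.false_eq_true, not_false_iff]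
        rw [joinQ_cons_head]

-- The inner loop, started at index i with enough fuel, preserves the length, does not move i
-- backwards, and its net effect viewed through the scanner is scanning from i in quoted state.
theorem fixInnerA_spec (fuel : Nat) :
    ∀ (l : List Char) (i : Nat), l.length - i ≤ fuel →
      (fixInnerA fuel l i).1.length = l.length ∧
      i ≤ (fixInnerA fuel l i).2 ∧
      (fixInnerA fuel l i).1.take (fixInnerA fuel l i).2
          ++ fixScanB ((fixInnerA fuel l i).1.drop (fixInnerA fuel l i).2) false
        = l.take i ++ fixScanB (l.drop i) true := by
  induction fuel with
  | zero =>
    intro l i h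
    have hi : l.length ≤ i := by omega
    simp [fixInnerA, List.drop_eq_nil_of_le hi, fixScanB]
  | succ fuel ih =>
    intro l i h
    by_cases hlt : i < l.length
    · have hdrop : l.drop i = l[i] :: l.drop (i + 1) := List.drop_eq_getElem_cons hlt
      have htks : l.take (i + 1) = l.take i ++ [l[i]] :=
        List.take_succ_eq_append_getElem hlt
      by_cases hq : l[i] = '"'
      · -- closing quote: break
        have hcall : fixInnerA (fuel + 1) l i = (l, i + 1) := by
          simp [fixInnerA, if_pos hlt, List.getElem?_eq_getElem hlt, hq]
        rw [hcall]
        refine ⟨rfl, by omega, ?_⟩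
        rw [hdrop, hq, htks, hq]
        simp [fixScanB]
      · by_cases hsp : l[i] = ' ' ∨ l[i] = '\t'
        · -- quoted whitespace: splice in '_' and continue
          have hcall : fixInnerA (fuel + 1) l i
              = fixInnerA fuel (l.take i ++ ['_'] ++ l.drop (i + 1)) (i + 1) := by
            rcases hsp with hsp | hsp <;>
              simp [fixInnerA, if_pos hlt, List.getElem?_eq_getElem hlt, hsp]
          have hlen' : (l.take i ++ ['_'] ++ l.drop (i + 1)).length = l.length := by
            simp [List.length_take, List.length_drop]; omega
          have htklen : (l.take i).length = i := by simp; omega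
          have htk : (l.take i ++ ['_'] ++ l.drop (i + 1)).take (i + 1) = l.take i ++ ['_'] := by
            rw [List.append_assoc, List.take_append]
            simp [htklen]
          have hdr : (l.take i ++ ['_'] ++ l.drop (i + 1)).drop (i + 1) = l.drop (i + 1) := by
            rw [List.append_assoc, List.drop_append]
            simp [htklen]
          have ihs := ih (l.take i ++ ['_'] ++ l.drop (i + 1)) (i + 1) (by omega)
          refine ⟨by rw [hcall, ihs.1, hlen'], by rw [hcall]; omega, ?_⟩
          rw [hcall, ihs.2.2, htk, hdr, hdrop]
          rcases hsp with hsp | hsp <;> simp [hsp, fixScanB]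
        · -- ordinary char inside quotes: continue unchanged
          rw [not_or] at hsp
          have hcall : fixInnerA (fuel + 1) l i = fixInnerA fuel l (i + 1) := by
            simp [fixInnerA, if_pos hlt, List.getElem?_eq_getElem hlt, hq, hsp.1, hsp.2]
          have ihs := ih l (i + 1) (by omega)
          refine ⟨by rw [hcall]; exact ihs.1, by rw [hcall]; omega, ?_⟩
          rw [hcall, ihs.2.2, hdrop, htks, List.append_assoc]
          simp [fixScanB, hq, hsp.1, hsp.2]
    · have hi : l.length ≤ i := by omega
      simp [fixInnerA, hlt, List.drop_eq_nil_of_le hi, fixScanB]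

-- The outer loop, with enough fuel, computes exactly B's scan of the unprocessed suffix.
theorem fixOuterA_spec (fuel : Nat) :
    ∀ (l : List Char) (i : Nat), l.length - i ≤ fuel →
      fixOuterA fuel l i = l.take i ++ fixScanB (l.drop i) false := by
  induction fuel with
  | zero =>
    intro l i h
    have hi : l.length ≤ i := by omega
    simp [fixOuterA, List.drop_eq_nil_of_le hi, fixScanB, List.take_of_length_le hi]
  | succ fuel ih =>
    intro l i h
    by_cases hlt : i < l.length
    · have hdrop : l.drop i = l[i] :: l.drop (i + 1) := List.drop_eq_getElem_cons hlt
      have htks : l.take (i + 1) = l.take i ++ [l[i]] :=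
        List.take_succ_eq_append_getElem hlt
      by_cases hq : l[i] = '"'
      · -- a quote: run the inner loop, then continue after it
        have hinner := fixInnerA_spec l.length l (i + 1) (by omega)
        have hcall : fixOuterA (fuel + 1) l i
            = fixOuterA fuel (fixInnerA l.length l (i + 1)).1 (fixInnerA l.length l (i + 1)).2 := by
          simp [fixOuterA, if_pos hlt, List.getElem?_eq_getElem hlt, hq]
        rw [hcall, ih _ _ (by rw [hinner.1]; omega), hinner.2.2, hdrop, hq, htks, hq]
        simp [fixScanB]
      · -- not a quote: skip
        have hcall : fixOuterA (fuel + 1) l i = fixOuterA fuel l (i + 1) := by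
          simp [fixOuterA, if_pos hlt, List.getElem?_eq_getElem hlt, hq]
        rw [hcall, ih l (i + 1) (by omega), hdrop, htks, List.append_assoc]
        simp [fixScanB, hq]
    · have hi : l.length ≤ i := by omega
      simp [fixOuterA, hlt, List.drop_eq_nil_of_le hi, fixScanB, List.take_of_length_le hi]

-- ===== VERDICT (by name: the statement is the Claim_ definition above) =====
theorem fix_quoted_whitespace_py_spec : Claim_equal_fix_quoted_whitespace_py := by
  intro line _
  unfold Spec_fix_quoted_whitespace_py fix_quoted_whitespace_py fix_quoted_whitespace_py_alt
  rw [fixOuterA_spec line.toList.length line.toList 0 (by omega), ← scan_eq_parts]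
  simp
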